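-- pv_equiv track=rewrite | github.com/nehalkarrar/codeSignal | digit anagrams.py | solution
-- ===== SOURCE A (Python) =====
-- def solution(a):
--     count = 0
--     for i in range(len(a)-1):
--         lst1 = list(str(a[i]))
--         lst1.sort()
--         for j in range(i+1, len(a)):
--             lst2 = list(str(a[j]))
--             lst2.sort()
--             if lst1 == lst2:
--                 count += 1
--     return count
-- ===== SOURCE B (Python) =====
-- def solution(a):
--     seen = {}
--     count = 0
--     for x in a:
--         k = tuple(sorted(str(x)))
--         c = seen.get(k, 0)
--         count += c
--         seen[k] = c + 1
--     return count
-- ===== Notes on version B (the rewrite author's own statement) =====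
-- stated objective: faster
-- what changed: Replaces the O(n^2) all-pairs comparison of sorted digit strings by a single pass that keys each element by its sorted-character tuple in a hash map and adds the number of previously seen elements with the same key.
import Mathlib
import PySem

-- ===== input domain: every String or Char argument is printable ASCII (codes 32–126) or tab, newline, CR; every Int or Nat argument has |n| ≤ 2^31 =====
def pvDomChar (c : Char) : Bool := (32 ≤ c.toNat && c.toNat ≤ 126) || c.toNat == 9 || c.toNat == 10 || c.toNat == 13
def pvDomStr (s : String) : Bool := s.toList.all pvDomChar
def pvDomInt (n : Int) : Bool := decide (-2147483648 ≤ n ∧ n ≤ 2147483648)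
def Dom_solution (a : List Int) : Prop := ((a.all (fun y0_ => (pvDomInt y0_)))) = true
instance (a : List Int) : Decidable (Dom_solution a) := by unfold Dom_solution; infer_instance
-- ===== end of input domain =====

-- B replaces A's O(n^2) all-pairs scan by one pass over a hash map keyed by the
-- sorted characters of str(x): faster (asymptotic).

-- ===== PORT A =====
def solution (a : List Int) : Int :=
  (PySem.List.pyRange 0 ((a.length : Int) - 1) 1).foldl (fun count i =>
    let lst1 := PySem.List.sorted (PySem.Int.toStr (PySem.List.pyGetD a i 0)).toList (fun c => c) false
    (PySem.List.pyRange (i + 1) (a.length : Int) 1).foldl (fun count j =>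
      let lst2 := PySem.List.sorted (PySem.Int.toStr (PySem.List.pyGetD a j 0)).toList (fun c => c) false
      if lst1 = lst2 then count + 1 else count) count) 0

-- ===== PORT B =====
-- key of an element: tuple(sorted(str(x))), as a list of characters
def solKey (x : Int) : List Char :=
  PySem.List.sorted (PySem.Int.toStr x).toList (fun c => c) false

def solution_alt (a : List Int) : Int :=
  (a.foldl (fun (p : PySem.Dict (List Char) Int × Int) x =>
      let k := solKey x
      let c := p.1.getD k 0
      (p.1.insert k (c + 1), p.2 + c))
    (PySem.Dict.empty, 0)).2

-- ===== PRECONDITION & SPEC =====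
def Spec_solution (a : List Int) (out : Int) : Prop := out = solution_alt a
instance (a : List Int) (out : Int) : Decidable (Spec_solution a out) := by unfold Spec_solution; infer_instance

-- ===== CLAIM (what is proved, stated in full; the proofs are below) =====
def Claim_equal_solution : Prop := ∀ (a : List Int), Dom_solution a → Spec_solution a (solution a)

-- ===== LEMMAS AND PROOFS =====

-- i-th term of A's outer loop: matches of key a[i] among the later elements
def gterm (l : List Int) (i : Int) : Int :=
  ((l.drop (i + 1).toNat).countP
    (fun y => decide (solKey (PySem.List.pyGetD l i 0) = solKey y)) : Int)

-- number of anagram pairs, head first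
def pairsFrom : List Int → Int
  | [] => 0
  | x :: xs => (xs.countP (fun y => decide (solKey x = solKey y)) : Int) + pairsFrom xs

-- running value of B's counter pass starting from dict d
def bsum (d : PySem.Dict (List Char) Int) : List Int → Int
  | [] => 0
  | x :: xs => d.getD (solKey x) 0 + bsum (d.insert (solKey x) (d.getD (solKey x) 0 + 1)) xs

lemma inner_eq (l : List Int) (i c : Int) (hi : 0 ≤ i) :
    (PySem.List.pyRange (i + 1) ((l.length : Int)) 1).foldl (fun count j =>
      if solKey (PySem.List.pyGetD l i 0) = solKey (PySem.List.pyGetD l j 0)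
      then count + 1 else count) c
    = c + gterm l i := by
  have h := PySem.List.foldl_pyRange_pyGetD' l 0
    (fun count y => if solKey (PySem.List.pyGetD l i 0) = solKey y then count + 1 else count)
    c (a := i + 1) (by omega)
  have h2 := PySem.List.foldl_count_if
    (fun y => decide (solKey (PySem.List.pyGetD l i 0) = solKey y)) (l.drop (i + 1).toNat) c
  simp only [decide_eq_true_eq] at h2
  unfold gterm
  exact h.trans h2

lemma sol_sum (l : List Int) :
    solution l = ((PySem.List.pyRange 0 ((l.length : Int) - 1) 1).map (gterm l)).sum := by
  unfold solution
  rw [PySem.List.foldl_congr_mem _ _ (fun count i => count + gterm l i) 0 ?_]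
  · rw [PySem.List.foldl_add]; ring
  · intro acc i hi
    have h0 : 0 ≤ i := (PySem.List.mem_pyRange_one.mp hi).1
    simpa [solKey] using inner_eq l i acc h0

lemma gterm_shift (x : Int) (xs : List Int) (k : Nat) :
    gterm (x :: xs) (1 + (k : Int)) = gterm xs (k : Int) := by
  unfold gterm
  have h1 : (1 + (k : Int) + 1).toNat = k + 2 := by omega
  have h2 : ((k : Int) + 1).toNat = k + 1 := by omega
  have h3 : (1 + (k : Int)) = ((k + 1 : Nat) : Int) := by push_cast; ring
  rw [h1, h2, h3, PySem.List.pyGetD_natCast, PySem.List.pyGetD_natCast]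
  simp [List.getD]
  rfl

lemma sum_g_cons (x : Int) (xs : List Int)
    (ih : ((PySem.List.pyRange 0 ((xs.length : Int) - 1) 1).map (gterm xs)).sum = pairsFrom xs) :
    ((PySem.List.pyRange 0 ((((x :: xs)).length : Int) - 1) 1).map (gterm (x :: xs))).sum
      = pairsFrom (x :: xs) := by
  have hb : ((x :: xs).length : Int) - 1 = (xs.length : Int) := by simp
  rw [hb]
  rcases Nat.eq_zero_or_pos xs.length with h0 | hpos
  · rcases List.length_eq_zero_iff.mp h0 with rfl
    simp [PySem.List.pyRange_one_eq_nil, pairsFrom]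
  · rw [PySem.List.pyRange_one_cons (a := 0) (b := (xs.length : Int)) (by exact_mod_cast hpos)]
    rw [List.map_cons, List.sum_cons]
    have hhead : gterm (x :: xs) 0 =
        (xs.countP (fun y => decide (solKey x = solKey y)) : Int) := by
      unfold gterm
      rw [PySem.List.pyGetD_zero_cons]
      norm_num
    have htail :
        ((PySem.List.pyRange (0 + 1) ((xs.length : Int)) 1).map (gterm (x :: xs))).sum
          = ((PySem.List.pyRange 0 ((xs.length : Int) - 1) 1).map (gterm xs)).sum := by
      have hlen : ((xs.length : Int) - (0 + 1)).toNat = ((xs.length : Int) - 1 - 0).toNat := by omega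
      simp only [PySem.List.pyRange_one, List.map_map, hlen]
      refine congrArg List.sum ?_
      apply List.map_congr_left
      intro k hk
      simp only [Function.comp_apply]
      simpa using gterm_shift x xs k
    rw [htail, ih, hhead, pairsFrom]

lemma sum_g (l : List Int) :
    ((PySem.List.pyRange 0 ((l.length : Int) - 1) 1).map (gterm l)).sum = pairsFrom l := by
  induction l with
  | nil => simp [PySem.List.pyRange_one_eq_nil (by norm_num : (-1 : Int) ≤ 0), pairsFrom]
  | cons x xs ih => exact sum_g_cons x xs ih

lemma alt_run (xs : List Int) (d : PySem.Dict (List Char) Int) (c : Int) :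
    (xs.foldl (fun (p : PySem.Dict (List Char) Int × Int) x =>
        let k := solKey x
        let cc := p.1.getD k 0
        (p.1.insert k (cc + 1), p.2 + cc)) (d, c)).2 = c + bsum d xs := by
  induction xs generalizing d c with
  | nil => simp [bsum]
  | cons x xs ih =>
    simp only [List.foldl_cons, bsum]
    rw [ih]
    ring

lemma bsum_eq (xs : List Int) (d : PySem.Dict (List Char) Int) :
    bsum d xs = pairsFrom xs + (xs.map (fun y => d.getD (solKey y) 0)).sum := by
  induction xs generalizing d with
  | nil => simp [bsum, pairsFrom]
  | cons x xs ih =>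
    rw [bsum, ih, pairsFrom]
    have hmap : (xs.map (fun y => (d.insert (solKey x) (d.getD (solKey x) 0 + 1)).getD (solKey y) 0))
        = xs.map (fun y => d.getD (solKey y) 0 +
            (if (fun y => decide (solKey x = solKey y)) y = true then 1 else 0)) := by
      apply List.map_congr_left
      intro y _
      rw [PySem.Dict.getD_insert]
      by_cases h : solKey y = solKey x
      · simp [h]
      · have h' : ¬ (solKey x = solKey y) := fun hh => h hh.symm
        simp [h, h']
    rw [hmap, PySem.List.sum_map_add_int, PySem.List.sum_map_ite_one_zero]
    simp only [List.map_cons, List.sum_cons]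
    ring

-- ===== VERDICT (by name: the statement is the Claim_ definition above) =====
theorem solution_spec : Claim_equal_solution := by
  intro a _
  unfold Spec_solution solution_alt
  rw [alt_run, bsum_eq, sol_sum, sum_g]
  simp
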